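-- pv_equiv track=rewrite | github.com/BERGER-Matthieu/Python-B2 | quest1/shopping.py | remember_the_milk
-- ===== SOURCE A (Python) =====
-- def remember_the_milk(shopping_list):
--     shopping_list = clean_list(shopping_list)
--     shopping_list_len = len(shopping_list)
--
--     if len(shopping_list) == 0:
--         return shopping_list
--
--     milk = False
--     new_products_list = []
--
--     for product in shopping_list:
--         if product.split()[-1] == "Milk":
--             milk = True
--
--     if not milk:
--         shopping_list.append(f"{shopping_list_len + 1}/ Milk")
--
--     return shopping_list
--
-- def clean_list(shopping_list):
--     new_shopping_list = []
--
--     for i in range(len(shopping_list)):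
--         new_shopping_list.append(f"{i+1}/ {shopping_list[i].strip().capitalize()}")
--
--     return new_shopping_list
-- ===== SOURCE B (Python) =====
-- def remember_the_milk(shopping_list):
--     if not shopping_list:
--         return []
--     items = [s.strip().capitalize() for s in shopping_list]
--     if "Milk" not in items:
--         items.append("Milk")
--     return [f"{i}/ {it}" for i, it in enumerate(items, 1)]
-- ===== Notes on version B (the rewrite author's own statement) =====
-- stated objective: simpler
-- what changed: B never parses the formatted strings: instead of A's format-then-rescan (clean_list, then split()[-1]=='Milk' on each numbered entry), B detects milk directly on the normalized raw items via a membership test ('Milk' not in items, correct because capitalize lowercases every non-initial character so a numbered entry's last token is 'Milk' exactly when the whole normalized item is 'Milk'), appends a plain 'Milk' sentinel before numbering, and applies the index prefix as one final enumerate pass.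
import Mathlib
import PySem

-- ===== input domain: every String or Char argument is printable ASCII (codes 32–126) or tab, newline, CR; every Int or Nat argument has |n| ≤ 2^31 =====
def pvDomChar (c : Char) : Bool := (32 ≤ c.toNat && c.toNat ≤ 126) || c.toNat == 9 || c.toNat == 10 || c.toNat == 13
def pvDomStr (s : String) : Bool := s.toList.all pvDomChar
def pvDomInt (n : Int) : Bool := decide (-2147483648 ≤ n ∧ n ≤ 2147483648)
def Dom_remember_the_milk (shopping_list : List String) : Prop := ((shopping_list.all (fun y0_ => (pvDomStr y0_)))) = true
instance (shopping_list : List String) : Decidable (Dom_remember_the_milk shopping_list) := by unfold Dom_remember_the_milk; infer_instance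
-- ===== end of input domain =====

-- B detects milk on the normalized raw items ("Milk" ∈ items) instead of A's re-parsing of
-- the numbered entries with split()[-1], and numbers everything in one final pass; objective: simpler.

-- shared built-in port: str.capitalize (upper first char, lower the rest; no PySem primitive exists)
def capChars (l : List Char) : List Char :=
  match l with
  | [] => []
  | c :: cs => PySem.Chars.upperChar c :: PySem.Chars.lower cs

def pyCapitalize (s : String) : String := String.ofList (capChars s.toList)

-- ===== PORT A =====
-- the f-string entry f"{i+1}/ {shopping_list[i].strip().capitalize()}"
def fmtEntry (i : Int) (s : String) : String :=
  PySem.Int.toStr (i + 1) ++ "/ " ++ pyCapitalize (PySem.Str.strip s)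

-- product.split()[-1] == "Milk"
def isMilk (e : String) : Bool :=
  ((PySem.List.pyGet? (PySem.Str.split₀ e) (-1)).getD "") == "Milk"

def clean_list (shopping_list : List String) : List String :=
  (PySem.List.pyRange 0 (shopping_list.length : Int) 1).foldl
    (fun acc i => acc ++ [fmtEntry i (PySem.List.pyGetD shopping_list i "")]) []

def remember_the_milk (shopping_list : List String) : List String :=
  let sl := clean_list shopping_list
  let n : Int := (sl.length : Int)
  if sl.length = 0 then sl
  else
    let milk := sl.foldl (fun m p => if isMilk p then true else m) false
    if milk = false then sl ++ [PySem.Int.toStr (n + 1) ++ "/ Milk"] else sl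

-- ===== PORT B =====
def remember_the_milk_alt (shopping_list : List String) : List String :=
  if shopping_list = [] then []
  else
    let items := shopping_list.map (fun s => pyCapitalize (PySem.Str.strip s))
    let items2 := if items.contains "Milk" then items else items ++ ["Milk"]
    items2.zipIdx.map (fun p => PySem.Int.toStr ((p.2 : Int) + 1) ++ "/ " ++ p.1)

-- ===== PRECONDITION & SPEC =====
def Spec_remember_the_milk (shopping_list : List String) (out : List String) : Prop := out = remember_the_milk_alt shopping_list
instance (shopping_list : List String) (out : List String) : Decidable (Spec_remember_the_milk shopping_list out) := by unfold Spec_remember_the_milk; infer_instance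

-- ===== CLAIM (what is proved, stated in full; the proofs are below) =====
def Claim_equal_remember_the_milk : Prop := ∀ (shopping_list : List String), Dom_remember_the_milk shopping_list → Spec_remember_the_milk shopping_list (remember_the_milk shopping_list)

-- ===== LEMMAS AND PROOFS =====


theorem toNat_ofNat' (n : Nat) (h : n < 55296) : (Char.ofNat n).toNat = n := by
  rw [Char.toNat_ofNat, if_pos (Or.inl h)]

theorem isspace_of_range (c : Char) (h : 65 ≤ c.toNat ∧ c.toNat ≤ 122) :
    PySem.Chars.isspace c = false := by
  simp only [PySem.Chars.isspace, Bool.or_eq_false_iff, Bool.and_eq_false_iff,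
    decide_eq_false_iff_not]
  omega

theorem isspace_upperChar (c : Char) (h : PySem.Chars.isspace c = false) :
    PySem.Chars.isspace (PySem.Chars.upperChar c) = false := by
  unfold PySem.Chars.upperChar
  split
  · rename_i hl
    simp only [PySem.Chars.islower, Bool.and_eq_true, decide_eq_true_eq] at hl
    have h1 : ('a' : Char).toNat ≤ c.toNat := Char.le_def.mp hl.1
    have h2 : c.toNat ≤ ('z' : Char).toNat := Char.le_def.mp hl.2
    have ha : ('a' : Char).toNat = 97 := rfl
    have hz : ('z' : Char).toNat = 122 := rfl
    apply isspace_of_range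
    rw [toNat_ofNat' _ (by omega)]
    omega
  · exact h

theorem isspace_lowerChar (c : Char) (h : PySem.Chars.isspace c = false) :
    PySem.Chars.isspace (PySem.Chars.lowerChar c) = false := by
  unfold PySem.Chars.lowerChar
  split
  · rename_i hu
    simp only [PySem.Chars.isupper, Bool.and_eq_true, decide_eq_true_eq] at hu
    have h1 : ('A' : Char).toNat ≤ c.toNat := Char.le_def.mp hu.1
    have h2 : c.toNat ≤ ('Z' : Char).toNat := Char.le_def.mp hu.2
    have ha : ('A' : Char).toNat = 65 := rfl
    have hz : ('Z' : Char).toNat = 90 := rfl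
    apply isspace_of_range
    rw [toNat_ofNat' _ (by omega)]
    omega
  · exact h

theorem lowerChar_ne_M (c : Char) : PySem.Chars.lowerChar c ≠ 'M' := by
  unfold PySem.Chars.lowerChar
  split
  · rename_i hu
    simp only [PySem.Chars.isupper, Bool.and_eq_true, decide_eq_true_eq] at hu
    have h1 : ('A' : Char).toNat ≤ c.toNat := Char.le_def.mp hu.1
    have h2 : c.toNat ≤ ('Z' : Char).toNat := Char.le_def.mp hu.2
    have ha : ('A' : Char).toNat = 65 := rfl
    have hz : ('Z' : Char).toNat = 90 := rfl
    intro he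
    have hM : ('M' : Char).toNat = 77 := rfl
    have := congrArg Char.toNat he
    rw [toNat_ofNat' _ (by omega), hM] at this
    omega
  · rename_i hu
    intro he
    subst he
    simp [PySem.Chars.isupper] at hu

theorem digitChar_nonspace (m : Nat) : PySem.Chars.isspace (Nat.digitChar m) = false := by
  rcases Nat.lt_or_ge m 16 with h | h
  · interval_cases m <;> decide
  · have : Nat.digitChar m = '*' := by
      unfold Nat.digitChar
      repeat rw [if_neg (by omega)]
    rw [this]; decide

theorem toDigitsCore_nonspace (fuel : Nat) : ∀ (n : Nat) (acc : List Char),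
    (∀ c ∈ acc, PySem.Chars.isspace c = false) →
    ∀ c ∈ Nat.toDigitsCore 10 fuel n acc, PySem.Chars.isspace c = false := by
  induction fuel with
  | zero => intro n acc hacc; simpa [Nat.toDigitsCore] using hacc
  | succ fuel ih =>
    intro n acc hacc
    simp only [Nat.toDigitsCore]
    have hacc' : ∀ c ∈ (n % 10).digitChar :: acc, PySem.Chars.isspace c = false := by
      intro c hc
      rcases List.mem_cons.mp hc with h | h
      · subst h; exact digitChar_nonspace _
      · exact hacc c h
    split
    · simpa using hacc'
    · exact ih _ _ hacc'

theorem toChars_nonspace (k : Nat) :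
    ∀ c ∈ PySem.Int.toChars ((k : Int) + 1), PySem.Chars.isspace c = false := by
  unfold PySem.Int.toChars
  rw [if_neg (by omega)]
  unfold Nat.toDigits
  exact toDigitsCore_nonspace _ _ _ (by simp)


theorem go_acc (r : List Char) : ∀ (cur : List Char) (acc : List (List Char)),
    PySem.Chars.split₀.go r cur acc = acc.reverse ++ PySem.Chars.split₀.go r cur [] := by
  induction r with
  | nil =>
    intro cur acc
    simp only [PySem.Chars.split₀.go]
    by_cases h : cur.isEmpty <;> simp [h]
  | cons c rest ih =>
    intro cur acc
    simp only [PySem.Chars.split₀.go]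
    by_cases hs : PySem.Chars.isspace c <;> by_cases hc : cur.isEmpty <;>
      simp only [hs, hc, if_true, if_false, Bool.false_eq_true]
    · rw [ih [] acc]
    · rw [ih [] (cur.reverse :: acc), ih [] [cur.reverse]]
      simp
    · rw [ih (c :: cur) acc]
    · rw [ih (c :: cur) acc]

theorem go_nonspace (w : List Char) (hw : ∀ c ∈ w, PySem.Chars.isspace c = false) :
    ∀ (r cur : List Char) (acc : List (List Char)),
    PySem.Chars.split₀.go (w ++ r) cur acc = PySem.Chars.split₀.go r (w.reverse ++ cur) acc := by
  induction w with
  | nil => intro r cur acc; simp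
  | cons c w ih =>
    intro r cur acc
    have hc : PySem.Chars.isspace c = false := hw c (by simp)
    simp only [List.cons_append, PySem.Chars.split₀.go, hc, Bool.false_eq_true, if_false]
    rw [ih (fun d hd => hw d (by simp [hd])) r (c :: cur) acc]
    simp

theorem go_ne_nil (r : List Char) : ∀ (cur : List Char) (acc : List (List Char)),
    (cur = [] → acc ≠ []) → PySem.Chars.split₀.go r cur acc ≠ [] := by
  induction r with
  | nil =>
    intro cur acc h
    simp only [PySem.Chars.split₀.go]
    by_cases hc : cur.isEmpty
    · have := h (List.isEmpty_iff.mp hc); simp [hc, this]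
    · simp [hc]
  | cons c rest ih =>
    intro cur acc h
    simp only [PySem.Chars.split₀.go]
    by_cases hs : PySem.Chars.isspace c <;> by_cases hc : cur.isEmpty <;>
      simp only [hs, hc, if_true, if_false, Bool.false_eq_true]
    · exact ih [] acc (fun _ => h (List.isEmpty_iff.mp hc))
    · exact ih [] (cur.reverse :: acc) (fun _ => by simp)
    · exact ih (c :: cur) acc (by simp)
    · exact ih (c :: cur) acc (by simp)

theorem go_all_space (r : List Char) : ∀ (cur : List Char) (acc : List (List Char)),
    PySem.Chars.split₀.go r cur acc = [] → ∀ c ∈ r, PySem.Chars.isspace c = true := by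
  induction r with
  | nil => intro _ _ _ c hc; simp at hc
  | cons c rest ih =>
    intro cur acc h d hd
    by_cases hs : PySem.Chars.isspace c
    · rcases List.mem_cons.mp hd with h1 | h1
      · subst h1; exact hs
      · by_cases hc : cur.isEmpty <;>
          simp only [PySem.Chars.split₀.go, hs, hc, if_true, if_false,
            Bool.false_eq_true] at h
        · exact ih [] acc h d h1
        · exact ih [] (cur.reverse :: acc) h d h1
    · exfalso
      simp only [PySem.Chars.split₀.go, hs, Bool.false_eq_true, if_false] at h
      exact go_ne_nil rest (c :: cur) acc (by simp) h

theorem go_chars (r : List Char) : ∀ (cur : List Char) (acc : List (List Char)) (t : List Char),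
    t ∈ PySem.Chars.split₀.go r cur acc → t ∈ acc ∨ ∀ ch ∈ t, ch ∈ cur ∨ ch ∈ r := by
  induction r with
  | nil =>
    intro cur acc t ht
    simp only [PySem.Chars.split₀.go] at ht
    by_cases hc : cur.isEmpty <;> simp [hc] at ht
    · exact Or.inl ht
    · rcases ht with ht | ht
      · exact Or.inl ht
      · rw [ht]; exact Or.inr (fun ch hch => Or.inl (by simpa using hch))
  | cons c rest ih =>
    intro cur acc t ht
    by_cases hs : PySem.Chars.isspace c <;> by_cases hc : cur.isEmpty <;>
      simp only [PySem.Chars.split₀.go, hs, hc, if_true, if_false,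
        Bool.false_eq_true] at ht
    · rcases ih [] acc t ht with h | h
      · exact Or.inl h
      · exact Or.inr (fun ch hch => by
          rcases h ch hch with h1 | h1
          · simp at h1
          · exact Or.inr (by simp [h1]))
    · rcases ih [] (cur.reverse :: acc) t ht with h | h
      · rcases List.mem_cons.mp h with h1 | h1
        · subst h1; exact Or.inr (fun ch hch => Or.inl (by simpa using hch))
        · exact Or.inl h1
      · exact Or.inr (fun ch hch => by
          rcases h ch hch with h1 | h1
          · simp at h1
          · exact Or.inr (by simp [h1]))
    · rcases ih (c :: cur) acc t ht with h | h
      · exact Or.inl h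
      · exact Or.inr (fun ch hch => by
          rcases h ch hch with h1 | h1
          · rcases List.mem_cons.mp h1 with h2 | h2
            · exact Or.inr (by simp [h2])
            · exact Or.inl h2
          · exact Or.inr (by simp [h1]))
    · rcases ih (c :: cur) acc t ht with h | h
      · exact Or.inl h
      · exact Or.inr (fun ch hch => by
          rcases h ch hch with h1 | h1
          · rcases List.mem_cons.mp h1 with h2 | h2
            · exact Or.inr (by simp [h2])
            · exact Or.inl h2
          · exact Or.inr (by simp [h1]))

theorem go_last_milk (cs : List Char) : ∀ (cur : List Char),
    'M' ∉ cs → (∀ c (h : cs ≠ []), cs.getLast h = c → PySem.Chars.isspace c = false) → cur ≠ [] →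
    ((PySem.Chars.split₀.go cs cur []).getLast? = some ['M','i','l','k'] ↔
      cur.reverse ++ cs = ['M','i','l','k']) := by
  induction cs with
  | nil =>
    intro cur _ _ hcur
    have hc : cur.isEmpty = false := by simpa [List.isEmpty_iff] using hcur
    simp only [PySem.Chars.split₀.go, hc]
    simp
  | cons c rest ih =>
    intro cur hM hlast hcur
    by_cases hs : PySem.Chars.isspace c
    · -- c is a space: both sides false
      have hc : cur.isEmpty = false := by simpa [List.isEmpty_iff] using hcur
      simp only [PySem.Chars.split₀.go, hs, if_true, hc, Bool.false_eq_true, if_false]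
      rw [go_acc rest [] [cur.reverse]]
      constructor
      · intro h
        exfalso
        rcases hgo : PySem.Chars.split₀.go rest [] [] with _ | ⟨t, ts⟩
        · -- rest splits to nothing: all of rest is whitespace, contradicting no trailing space
          rcases List.eq_nil_or_concat rest with hr | ⟨pre, d, hd⟩
          · subst hr
            have := hlast c (by simp) (by simp)
            rw [hs] at this; cases this
          · have hd' : PySem.Chars.isspace d = true := by
              apply go_all_space rest [] [] hgo
              simp [hd]
            have : (c :: rest).getLast (by simp) = d := by
              subst hd
              simp [List.getLast_cons, List.concat_eq_append]
            have := hlast d (by simp) this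
            rw [hd'] at this; cases this
        · rw [hgo] at h
          simp only [List.reverse_singleton, List.singleton_append, List.getLast?_cons_cons] at h
          have hmem : ['M','i','l','k'] ∈ t :: ts := List.mem_of_getLast? h
          have hmem2 := go_chars rest [] [] _ (hgo ▸ hmem)
          rcases hmem2 with h1 | h1
          · simp at h1
          · have : 'M' ∈ ([] : List Char) ∨ 'M' ∈ rest := h1 'M' (by decide)
            rcases this with h2 | h2
            · simp at h2
            · exact hM (by simp [h2])
      · intro h
        exfalso
        have : c ∈ (['M','i','l','k'] : List Char) := by
          rw [← h]; simp
        fin_cases this <;> simp_all <;> revert hs <;> decide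
    · -- c is not a space: push it onto cur
      simp only [PySem.Chars.split₀.go, hs, Bool.false_eq_true, if_false]
      rw [ih (c :: cur) (fun h => hM (by simp [h]))
          (fun d h hd => hlast d (by simp) (by rw [List.getLast_cons h]; exact hd))
          (by simp)]
      simp

theorem key_chars (w t : List Char) (hw : ∀ c ∈ w, PySem.Chars.isspace c = false)
    (ht_head : ∀ c, t.head? = some c → PySem.Chars.isspace c = false)
    (ht_last : ∀ c, t.getLast? = some c → PySem.Chars.isspace c = false) :
    ((PySem.Chars.split₀ (w ++ '/' :: ' ' :: capChars t)).getLast? = some ['M','i','l','k'] ↔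
      capChars t = ['M','i','l','k']) := by
  have hw' : ∀ c ∈ w ++ ['/'], PySem.Chars.isspace c = false := by
    intro c hc
    rcases List.mem_append.mp hc with h | h
    · exact hw c h
    · simp at h; subst h; decide
  have hsplit : PySem.Chars.split₀ (w ++ '/' :: ' ' :: capChars t)
      = (w ++ ['/']) :: PySem.Chars.split₀.go (capChars t) [] [] := by
    have h1 : w ++ '/' :: ' ' :: capChars t = (w ++ ['/']) ++ ' ' :: capChars t := by simp
    rw [PySem.Chars.split₀, h1, go_nonspace (w ++ ['/']) hw' _ _ _]
    simp only [PySem.Chars.split₀.go, show PySem.Chars.isspace ' ' = true from rfl, if_true,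
      List.append_nil, List.reverse_reverse]
    rw [go_acc (capChars t) [] [w ++ ['/']]]
    simp
  rw [hsplit]
  rcases t with _ | ⟨t0, ts⟩
  · constructor
    · intro h
      exfalso
      simp only [capChars, show PySem.Chars.split₀.go [] [] [] = [] from rfl,
        List.getLast?_singleton, Option.some.injEq] at h
      have := congrArg List.getLast? h
      rw [List.getLast?_concat] at this
      simp at this
    · intro h; simp [capChars] at h
  · have hc : PySem.Chars.isspace (PySem.Chars.upperChar t0) = false :=
      isspace_upperChar t0 (ht_head t0 rfl)
    have hgo : PySem.Chars.split₀.go (capChars (t0 :: ts)) [] []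
        = PySem.Chars.split₀.go (PySem.Chars.lower ts) [PySem.Chars.upperChar t0] [] := by
      simp only [capChars, PySem.Chars.split₀.go, hc, Bool.false_eq_true, if_false]
    rw [hgo]
    have hne : PySem.Chars.split₀.go (PySem.Chars.lower ts) [PySem.Chars.upperChar t0] [] ≠ [] :=
      go_ne_nil _ _ _ (by simp)
    have hcons : ∀ (a : List Char) (l : List (List Char)), l ≠ [] →
        (a :: l).getLast? = l.getLast? := by
      intro a l hl
      rcases l with _ | ⟨b, m⟩
      · exact absurd rfl hl
      · exact List.getLast?_cons_cons ..
    rw [hcons _ _ hne]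
    rw [go_last_milk (PySem.Chars.lower ts) [PySem.Chars.upperChar t0]
      (by
        intro hm
        rcases List.mem_map.mp hm with ⟨x, _, hx⟩
        exact lowerChar_ne_M x hx)
      (by
        intro d h hd
        have hts : ts ≠ [] := by
          intro h0; subst h0; simp [PySem.Chars.lower] at h
        have h2 : PySem.Chars.isspace (ts.getLast hts) = false := by
          apply ht_last
          rw [List.getLast?_eq_some_getLast (l := t0 :: ts) (by simp), List.getLast_cons hts]
        have hlast : (PySem.Chars.lower ts).getLast h = PySem.Chars.lowerChar (ts.getLast hts) :=
          List.getLast_map _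
        rw [← hd, hlast]
        exact isspace_lowerChar _ h2)
      (by simp)]
    simp [capChars]

theorem strip_last (l : List Char) :
    ∀ c, (PySem.Chars.strip l).getLast? = some c → PySem.Chars.isspace c = false := by
  intro c h
  unfold PySem.Chars.strip PySem.Chars.rstrip at h
  rw [List.getLast?_reverse] at h
  have := List.head?_dropWhile_not PySem.Chars.isspace (PySem.Chars.lstrip l).reverse
  rw [h] at this
  exact this

theorem strip_head (l : List Char) :
    ∀ c, (PySem.Chars.strip l).head? = some c → PySem.Chars.isspace c = false := by
  intro c h
  unfold PySem.Chars.strip PySem.Chars.rstrip at h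
  rw [List.head?_reverse] at h
  have hsuf := List.dropWhile_suffix (l := (PySem.Chars.lstrip l).reverse) PySem.Chars.isspace
  rcases hsuf with ⟨pre, hpre⟩
  have hne : List.dropWhile PySem.Chars.isspace (PySem.Chars.lstrip l).reverse ≠ [] := by
    intro h0; rw [h0] at h; simp at h
  have h2 : (PySem.Chars.lstrip l).reverse.getLast? = some c := by
    rw [← hpre, List.getLast?_append_of_ne_nil _ hne, h]
  rw [List.getLast?_reverse] at h2
  unfold PySem.Chars.lstrip at h2
  have := List.head?_dropWhile_not PySem.Chars.isspace l
  rw [h2] at this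
  exact this

theorem isMilk_fmt (k : Nat) (s : String) :
    isMilk (fmtEntry (k : Int) s) = (pyCapitalize (PySem.Str.strip s) == "Milk") := by
  have htl : (fmtEntry (k : Int) s).toList
      = PySem.Int.toChars ((k : Int) + 1) ++ '/' :: ' ' :: capChars (PySem.Chars.strip s.toList) := by
    simp [fmtEntry, pyCapitalize, String.toList_append, PySem.Int.toList_toStr]
  have hkey := key_chars (PySem.Int.toChars ((k : Int) + 1)) (PySem.Chars.strip s.toList)
    (toChars_nonspace k) (strip_head s.toList) (strip_last s.toList)
  rw [Bool.eq_iff_iff]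
  simp only [isMilk, PySem.List.pyGet?_neg_one, PySem.Str.split₀, List.getLast?_map, beq_iff_eq]
  rw [htl] at *
  constructor
  · intro h
    rcases hL : (PySem.Chars.split₀ (PySem.Int.toChars ((k : Int) + 1) ++ '/' :: ' ' :: capChars (PySem.Chars.strip s.toList))).getLast? with _ | tok
    · rw [hL] at h; simp at h
    · rw [hL] at h
      simp only [Option.map_some, Option.getD_some] at h
      have htok : tok = ['M','i','l','k'] := by
        have := congrArg String.toList h
        rw [String.toList_ofList] at this
        exact this
      have hcap := hkey.mp (by rw [hL, htok])
      simp only [pyCapitalize]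
      have hb : (PySem.Str.strip s).toList = PySem.Chars.strip s.toList := by simp
      rw [hb, hcap]
  · intro h
    have hcap : capChars (PySem.Chars.strip s.toList) = ['M','i','l','k'] := by
      simp only [pyCapitalize] at h
      have hb : (PySem.Str.strip s).toList = PySem.Chars.strip s.toList := by simp
      rw [hb] at h
      have := congrArg String.toList h
      rw [String.toList_ofList] at this
      exact this
    rw [hkey.mpr hcap]
    simp

theorem clean_eq (l : List String) :
    clean_list l = (List.range l.length).map (fun (k : Nat) => fmtEntry (k : Int) (l.getD k "")) := by
  rw [clean_list, PySem.List.foldl_append_singleton_eq_map, List.nil_append,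
    PySem.List.pyRange_one, List.map_map]
  simp only [Int.sub_zero, Int.toNat_natCast]
  apply List.map_congr_left
  intro k _
  simp [Function.comp, PySem.List.pyGetD_natCast]

theorem milk_fold (sl : List String) : ∀ (b : Bool),
    sl.foldl (fun m p => if isMilk p then true else m) b = (b || sl.any isMilk) := by
  induction sl with
  | nil => simp
  | cons x xs ih =>
    intro b
    simp only [List.foldl_cons, List.any_cons, ih]
    by_cases h : isMilk x = true <;> simp [h]

theorem any_range_getD (l : List String) (p : String → Bool) :
    (List.range l.length).any (fun k => p (l.getD k "")) = l.any p := by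
  rw [Bool.eq_iff_iff, List.any_eq_true, List.any_eq_true]
  constructor
  · rintro ⟨k, hk, hp⟩
    rw [List.mem_range] at hk
    exact ⟨l[k], List.getElem_mem hk, by rwa [List.getD_eq_getElem l "" hk] at hp⟩
  · rintro ⟨x, hx, hp⟩
    rcases List.mem_iff_getElem.mp hx with ⟨k, hk, hkx⟩
    exact ⟨k, List.mem_range.mpr hk, by rw [List.getD_eq_getElem l "" hk, hkx]; exact hp⟩

theorem items_fmt (l : List String) :
    ((l.map (fun s => pyCapitalize (PySem.Str.strip s))).zipIdx.map
        (fun p => PySem.Int.toStr ((p.2 : Int) + 1) ++ "/ " ++ p.1))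
      = (List.range l.length).map (fun (k : Nat) => fmtEntry (k : Int) (l.getD k "")) := by
  apply List.ext_getElem
  · simp
  · intro i h1 h2
    simp only [List.length_map, List.length_zipIdx, List.length_range] at h1 h2
    simp only [List.getElem_map, List.getElem_zipIdx, List.getElem_range]
    rw [List.getD_eq_getElem l "" h2]
    simp [fmtEntry]

-- ===== VERDICT (by name: the statement is the Claim_ definition above) =====
theorem remember_the_milk_spec : Claim_equal_remember_the_milk := by
  intro l _
  unfold Spec_remember_the_milk remember_the_milk remember_the_milk_alt
  simp only [clean_eq l, milk_fold, Bool.false_or]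
  have hlen : ((List.range l.length).map (fun (k : Nat) => fmtEntry (k : Int) (l.getD k ""))).length
      = l.length := by simp
  by_cases hl : l = []
  · subst hl; simp
  · have hlen0 : l.length ≠ 0 := by simpa [List.length_eq_zero_iff] using hl
    rw [if_neg (by rw [hlen]; exact hlen0), if_neg hl]
    have hany : ((List.range l.length).map (fun (k : Nat) => fmtEntry (k : Int) (l.getD k ""))).any isMilk
        = (l.map (fun s => pyCapitalize (PySem.Str.strip s))).contains "Milk" := by
      rw [List.any_map, List.contains_eq_any_beq, List.any_map]
      have h1 : (isMilk ∘ fun (k : Nat) => fmtEntry (k : Int) (l.getD k ""))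
          = fun k => (pyCapitalize (PySem.Str.strip (l.getD k "")) == "Milk") := by
        funext k
        exact isMilk_fmt k (l.getD k "")
      rw [h1]
      have h2 : ((fun x => "Milk" == x) ∘ fun s => pyCapitalize (PySem.Str.strip s))
          = fun s => (pyCapitalize (PySem.Str.strip s) == "Milk") := by
        funext s
        simp [BEq.comm]
      rw [h2, ← any_range_getD l (fun s => pyCapitalize (PySem.Str.strip s) == "Milk")]
    rw [hany]
    by_cases hm : (l.map (fun s => pyCapitalize (PySem.Str.strip s))).contains "Milk"
    · rw [if_pos hm, if_neg (by simp only [hm]; decide), items_fmt]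
    · rw [if_neg hm, if_pos (Bool.eq_false_iff.mpr hm), List.zipIdx_append, List.map_append, items_fmt]
      congr 1
      simp only [List.zipIdx, List.map_cons, List.map_nil, List.length_map, hlen]
      have : ("/ " ++ "Milk" : String) = "/ Milk" := by decide
      rw [String.append_assoc, this]
      simp
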